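-- pv_equiv track=rewrite | github.com/kitushenoy/mywork | CUDAPython/NLP/NLP-chapter1/encoder_demos/functional_translation.py | buffered_read
-- ===== SOURCE A (Python) =====
-- def buffered_read(input_text, buffer_size):
--     buffer = []
--     for src_str in input_text:
--         buffer.append(src_str.strip())
--         if len(buffer) >= buffer_size:
--             yield buffer
--             buffer = []
--
--     if len(buffer) > 0:
--         yield buffer
-- ===== SOURCE B (Python) =====
-- def buffered_read(input_text, buffer_size):
--     stripped = [s.strip() for s in input_text]
--     for i in range(0, len(stripped), buffer_size):
--         yield stripped[i:i + buffer_size]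
-- ===== Notes on version B (the rewrite author's own statement) =====
-- stated objective: simpler
-- what changed: Replaces the running buffer with its length check, reset and trailing flush by a single map pass over the lines followed by stride-based slicing into fixed-size chunks.
-- outside the precondition, e.g. on buffered_read(['a', 'b', 'c'], 0): A returns [['a'], ['b'], ['c']], B raises ValueError; on buffered_read(['a', 'b'], -1): A returns [['a'], ['b']], B returns []
import Mathlib
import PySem

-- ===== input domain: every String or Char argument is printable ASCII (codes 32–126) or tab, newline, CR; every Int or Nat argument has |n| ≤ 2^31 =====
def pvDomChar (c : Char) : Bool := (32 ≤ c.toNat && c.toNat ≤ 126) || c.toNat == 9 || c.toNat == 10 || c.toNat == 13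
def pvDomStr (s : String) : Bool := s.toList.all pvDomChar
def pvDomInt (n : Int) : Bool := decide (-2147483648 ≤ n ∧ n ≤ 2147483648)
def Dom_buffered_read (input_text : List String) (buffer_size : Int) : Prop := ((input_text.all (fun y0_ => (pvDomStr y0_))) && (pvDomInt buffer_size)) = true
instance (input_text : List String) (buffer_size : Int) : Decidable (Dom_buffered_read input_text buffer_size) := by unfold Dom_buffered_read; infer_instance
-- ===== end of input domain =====

-- B replaces A's running buffer / length-check / trailing flush by a map pass (strip) followed by stride-based slicing; objective: simpler.


-- ===== PORT A =====
-- the generator's for-loop: state (chunks yielded so far, current buffer)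
def bufLoop (buffer_size : Int) (out : List (List String)) (buffer : List String) :
    List String → List (List String) × List String
  | [] => (out, buffer)
  | src_str :: rest =>
      if PySem.List.len (buffer ++ [PySem.Str.strip src_str]) ≥ buffer_size then
        bufLoop buffer_size (out ++ [buffer ++ [PySem.Str.strip src_str]]) [] rest
      else
        bufLoop buffer_size out (buffer ++ [PySem.Str.strip src_str]) rest

def buffered_read (input_text : List String) (buffer_size : Int) : List (List String) :=
  if PySem.List.len (bufLoop buffer_size [] [] input_text).2 > 0 then
    (bufLoop buffer_size [] [] input_text).1 ++ [(bufLoop buffer_size [] [] input_text).2]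
  else
    (bufLoop buffer_size [] [] input_text).1

-- ===== PORT B =====
def buffered_read_alt (input_text : List String) (buffer_size : Int) : List (List String) :=
  let stripped := input_text.map PySem.Str.strip
  (PySem.List.pyRange 0 (PySem.List.len stripped) buffer_size).map
    (fun i => PySem.List.slice stripped (some i) (some (i + buffer_size)))

-- ===== PRECONDITION & SPEC =====
-- Pre_ restricts to the natural domain buffer_size ≥ 1: on nonpositive buffer_size A's
-- per-element flushing is an accident of the '>=' check, while B's range() raises
-- (buffer_size = 0) or produces no chunks (buffer_size < 0).
def Pre_buffered_read (input_text : List String) (buffer_size : Int) : Prop := 1 ≤ buffer_size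
instance (input_text : List String) (buffer_size : Int) : Decidable (Pre_buffered_read input_text buffer_size) := by unfold Pre_buffered_read; infer_instance

def pvWitness_buffered_read : List String × Int := ([" a ", "b", " c"], 2)

def Spec_buffered_read (input_text : List String) (buffer_size : Int) (out : List (List String)) : Prop := out = buffered_read_alt input_text buffer_size
instance (input_text : List String) (buffer_size : Int) (out : List (List String)) : Decidable (Spec_buffered_read input_text buffer_size out) := by unfold Spec_buffered_read; infer_instance

-- ===== CLAIM (what is proved, stated in full; the proofs are below) =====
def Claim_equal_buffered_read : Prop := ∀ (input_text : List String) (buffer_size : Int), Dom_buffered_read input_text buffer_size → Pre_buffered_read input_text buffer_size → Spec_buffered_read input_text buffer_size (buffered_read input_text buffer_size)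

-- ===== LEMMAS AND PROOFS =====

-- the common reference shape: greedy chunks of size n+1
def chunks (n : Nat) : List String → List (List String)
  | [] => []
  | x :: xs => (x :: xs).take (n + 1) :: chunks n ((x :: xs).drop (n + 1))
termination_by l => l.length
decreasing_by simp

theorem chunks_nil (n : Nat) : chunks n [] = [] := by rw [chunks]

theorem chunks_of_ne_nil (n : Nat) (l : List String) (h : l ≠ []) :
    chunks n l = l.take (n + 1) :: chunks n (l.drop (n + 1)) := by
  cases l with
  | nil => exact absurd rfl h
  | cons x xs => rw [chunks]

-- A's loop computes greedy chunks
theorem bufLoop_chunks (n : Nat) :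
    ∀ (l : List String) (out : List (List String)) (buf : List String),
      buf.length < n + 1 →
      (if PySem.List.len (bufLoop ((n : Int) + 1) out buf l).2 > 0 then
        (bufLoop ((n : Int) + 1) out buf l).1 ++ [(bufLoop ((n : Int) + 1) out buf l).2]
      else
        (bufLoop ((n : Int) + 1) out buf l).1)
        = out ++ chunks n (buf ++ l.map PySem.Str.strip) := by
  intro l
  induction l with
  | nil =>
      intro out buf hbuf
      simp only [bufLoop, List.map_nil, List.append_nil]
      cases buf with
      | nil => simp [PySem.List.len_eq, chunks_nil]
      | cons b bs =>
          rw [chunks_of_ne_nil n (b :: bs) (by simp)]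
          have h1 : (b :: bs).take (n + 1) = b :: bs :=
            List.take_of_length_le (by simp at hbuf ⊢; omega)
          have h2 : (b :: bs).drop (n + 1) = [] :=
            List.drop_eq_nil_of_le (by simp at hbuf ⊢; omega)
          simp [PySem.List.len_eq, h1, h2, chunks_nil]
  | cons s rest ih =>
      intro out buf hbuf
      simp only [bufLoop]
      by_cases hfull : buf.length + 1 = n + 1
      · have hcond : PySem.List.len (buf ++ [PySem.Str.strip s]) ≥ (n : Int) + 1 := by
          simp [PySem.List.len_eq]; omega
        rw [if_pos hcond]
        rw [ih (out ++ [buf ++ [PySem.Str.strip s]]) [] (by simp)]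
        have hne : buf ++ PySem.Str.strip s :: rest.map PySem.Str.strip ≠ [] := by
          intro h; exact absurd (congrArg List.length h) (by simp)
        rw [List.map_cons, chunks_of_ne_nil n _ hne]
        have hlen : (buf ++ [PySem.Str.strip s]).length = n + 1 := by simp; omega
        have hsplit : buf ++ PySem.Str.strip s :: rest.map PySem.Str.strip
            = (buf ++ [PySem.Str.strip s]) ++ rest.map PySem.Str.strip := by simp
        have htake : (buf ++ PySem.Str.strip s :: rest.map PySem.Str.strip).take (n + 1)
            = buf ++ [PySem.Str.strip s] := by
          rw [hsplit, List.take_append_of_le_length (by omega), ← hlen, List.take_length]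
        have hdrop : (buf ++ PySem.Str.strip s :: rest.map PySem.Str.strip).drop (n + 1)
            = rest.map PySem.Str.strip := by
          rw [hsplit, ← hlen, List.drop_left]
        rw [htake, hdrop]
        simp
      · have hcond : ¬ PySem.List.len (buf ++ [PySem.Str.strip s]) ≥ (n : Int) + 1 := by
          simp [PySem.List.len_eq]; omega
        rw [if_neg hcond]
        rw [ih out (buf ++ [PySem.Str.strip s]) (by simp; omega)]
        simp

-- B's stride-slicing computes greedy chunks
theorem slice_chunks (n : Nat) :
    ∀ (c : Nat) (l : List String), c = (l.length + n) / (n + 1) →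
      (List.range c).map (fun k => (l.drop ((n + 1) * k)).take (n + 1)) = chunks n l := by
  intro c
  induction c with
  | zero =>
      intro l hc
      cases l with
      | nil => simp [chunks_nil]
      | cons x xs =>
          exfalso
          have h2 : 1 ≤ (xs.length + 1 + n) / (n + 1) :=
            (Nat.one_le_div_iff (by omega)).mpr (by omega)
          have hcl : (x :: xs).length + n = xs.length + 1 + n := by simp
          rw [hcl] at hc
          omega
  | succ c ih =>
      intro l hc
      cases l with
      | nil =>
          exfalso
          have h4 : n / (n + 1) = 0 := Nat.div_eq_of_lt (by omega)
          simp at hc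
          omega
      | cons x xs =>
          rw [chunks_of_ne_nil n (x :: xs) (by simp)]
          rw [List.range_succ_eq_map, List.map_cons]
          simp only [Nat.mul_zero, List.drop_zero]
          congr 1
          rw [List.map_map]
          have heq : ((fun k => ((x :: xs).drop ((n + 1) * k)).take (n + 1)) ∘ Nat.succ)
              = fun k => (((x :: xs).drop (n + 1)).drop ((n + 1) * k)).take (n + 1) := by
            funext k
            simp only [Function.comp, Nat.succ_eq_add_one]
            rw [List.drop_drop, show (n + 1) + (n + 1) * k = (n + 1) * (k + 1) from by ring]
          rw [heq]
          apply ih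
          have hlen : ((x :: xs).drop (n + 1)).length = xs.length - n := by simp
          rw [hlen]
          have hcl : (x :: xs).length + n = xs.length + 1 + n := by simp
          rw [hcl] at hc
          by_cases hle : xs.length ≤ n
          · have hrw : xs.length - n + n = n := by omega
            rw [hrw, Nat.div_eq_of_lt (by omega)]
            have hq1 : (xs.length + 1 + n) / (n + 1) = 1 := by
              have hge : 1 ≤ (xs.length + 1 + n) / (n + 1) :=
                (Nat.one_le_div_iff (by omega)).mpr (by omega)
              have hlt : (xs.length + 1 + n) / (n + 1) < 2 := by
                rw [Nat.div_lt_iff_lt_mul (by omega)]; omega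
              omega
            omega
          · have hrw : xs.length - n + n = xs.length := by omega
            rw [hrw]
            have h5 : xs.length + 1 + n = xs.length + (n + 1) := by omega
            have h6 : (xs.length + (n + 1)) / (n + 1) = xs.length / (n + 1) + 1 :=
              Nat.add_div_right _ (by omega)
            rw [h5, h6] at hc
            omega

theorem buffered_read_alt_chunks (input_text : List String) (n : Nat) :
    buffered_read_alt input_text ((n : Int) + 1) = chunks n (input_text.map PySem.Str.strip) := by
  have hrfl : buffered_read_alt input_text ((n : Int) + 1)
      = (PySem.List.pyRange 0 (PySem.List.len (input_text.map PySem.Str.strip)) ((n : Int) + 1)).map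
          (fun i => PySem.List.slice (input_text.map PySem.Str.strip) (some i) (some (i + ((n : Int) + 1)))) := rfl
  rw [hrfl]
  set l := input_text.map PySem.Str.strip with hl
  rw [PySem.List.len_eq]
  rw [PySem.List.pyRange_of_pos 0 (l.length : Int) (by omega)]
  rw [List.map_map]
  set c : Nat := (if (0 : Int) < (l.length : Int) then (((l.length : Int) - 0 + ((n : Int) + 1) - 1) / ((n : Int) + 1)).toNat else 0) with hcdef
  have hc : c = (l.length + n) / (n + 1) := by
    rw [hcdef]
    by_cases h0 : 0 < l.length
    · rw [if_pos (by exact_mod_cast h0)]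
      have e1 : (l.length : Int) - 0 + ((n : Int) + 1) - 1 = ((l.length + n : Nat) : Int) := by
        push_cast; ring
      have e2 : ((n : Int) + 1) = ((n + 1 : Nat) : Int) := by push_cast; ring
      have e3 : ((l.length + n : Nat) : Int) / ((n + 1 : Nat) : Int)
          = (((l.length + n) / (n + 1) : Nat) : Int) := by norm_cast
      rw [e1, e2, e3]
      exact Int.toNat_natCast _
    · rw [if_neg (by exact_mod_cast h0)]
      have hl0 : l.length = 0 := by omega
      rw [hl0]
      symm
      exact Nat.div_eq_of_lt (by omega)
  have hmap : (List.range c).map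
      ((fun i => PySem.List.slice l (some i) (some (i + ((n : Int) + 1)))) ∘ (fun k : Nat => 0 + ((n : Int) + 1) * (k : Int)))
      = (List.range c).map (fun k => (l.drop ((n + 1) * k)).take (n + 1)) := by
    apply List.map_congr_left
    intro k _
    simp only [Function.comp, zero_add]
    have h1 : ((n : Int) + 1) * (k : Int) = (((n + 1) * k : Nat) : Int) := by push_cast; ring
    have h2 : (((n + 1) * k : Nat) : Int) + ((n : Int) + 1)
        = (((n + 1) * k : Nat) : Int) + (((n + 1 : Nat)) : Int) := by push_cast; ring
    rw [h1, h2, PySem.List.slice_natCast_add]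
  rw [hmap, slice_chunks n c l hc]

-- ===== VERDICT (by name: the statement is the Claim_ definition above) =====
theorem buffered_read_spec : Claim_equal_buffered_read := by
  intro input_text buffer_size _hdom hpre
  unfold Spec_buffered_read
  have h1 : 1 ≤ buffer_size := hpre
  have hn : buffer_size = (((buffer_size - 1).toNat : Nat) : Int) + 1 := by omega
  set n := (buffer_size - 1).toNat with hndef
  rw [hn]
  rw [buffered_read_alt_chunks input_text n]
  unfold buffered_read
  have := bufLoop_chunks n input_text [] [] (by simp)
  simpa using this
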